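-- pv_equiv track=rewrite | github.com/pvpk1994/Leetcode_Medium | Python/Smart_Sale.py | delete_products
-- ===== SOURCE A (Python) =====
-- from collections import Counter
--
-- def delete_products(ids:list, m:int)->int:
-- 	# O(NlogN)
-- 	# base conditions
-- 	if len(ids)==0:
-- 		return 0
-- 	ids = sorted(ids)
-- 	tup_ids = Counter(ids).most_common()
-- 	# tuple generation
-- 	while m >= tup_ids[-1][1]:
-- 		m = m-tup_ids[-1][1]
-- 		tup_ids.pop()
-- 	return len(tup_ids)
-- ===== SOURCE B (Python) =====
-- from collections import Counter
--
-- def delete_products(ids: list, m: int) -> int: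
--     # count each id once, sort only the (distinct) frequencies ascending,
--     # then greedily consume the smallest groups -- no sort of the full list
--     counts = sorted(Counter(ids).values())
--     k = len(counts)
--     for f in counts:
--         if m < f:
--             break
--         m -= f
--         k -= 1
--     return k
-- ===== Notes on version B (the rewrite author's own statement) =====
-- stated objective: faster
-- what changed: B never sorts the full id list: it counts frequencies in one dict pass, sorts only the distinct-group frequency values ascending, and greedily consumes the smallest groups in a forward scan, instead of A's sort-everything + Counter.most_common + pop-from-the-back loop.
import Mathlib
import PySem

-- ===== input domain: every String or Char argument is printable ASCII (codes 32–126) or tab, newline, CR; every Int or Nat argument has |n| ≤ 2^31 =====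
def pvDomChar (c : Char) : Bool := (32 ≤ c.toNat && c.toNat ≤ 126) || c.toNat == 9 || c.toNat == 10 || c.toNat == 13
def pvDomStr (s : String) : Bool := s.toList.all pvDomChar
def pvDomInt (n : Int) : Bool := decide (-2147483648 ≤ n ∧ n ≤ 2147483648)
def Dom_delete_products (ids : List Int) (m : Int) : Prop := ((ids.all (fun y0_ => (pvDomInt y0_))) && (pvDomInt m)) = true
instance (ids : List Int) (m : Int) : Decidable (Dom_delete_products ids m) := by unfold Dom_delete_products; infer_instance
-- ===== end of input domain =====

-- B counts frequencies without sorting the full list, sorts only the distinct-id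
-- frequencies ascending and consumes them greedily (objective: faster).


-- ===== PORT A =====
-- the 'while m >= tup_ids[-1][1]: … tup_ids.pop()' loop; on empty (Python IndexError,
-- excluded by Pre_) it returns 0
def popLoopA (tup : List (Int × Int)) (m : Int) : Int :=
  match htup : tup.getLast? with
  | none => 0
  | some kc =>
    if kc.2 ≤ m then popLoopA tup.dropLast (m - kc.2)
    else (tup.length : Int)
termination_by tup.length
decreasing_by
  cases tup with
  | nil => simp at htup
  | cons a t => simp [List.length_dropLast]

def delete_products (ids : List Int) (m : Int) : Int :=
  if ids.length = 0 then 0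
  else
    let ids' := PySem.List.sorted ids (fun x => x) false
    -- Counter(ids').most_common() = sorted(counter.items(), key=itemgetter(1), reverse=True)
    let tup_ids := PySem.List.sorted (PySem.Dict.counter ids').items (fun kv => kv.2) true
    popLoopA tup_ids m

-- ===== PORT B =====
def greedyB (counts : List Int) (m : Int) (k : Int) : Int :=
  match counts with
  | [] => k
  | f :: rest => if m < f then k else greedyB rest (m - f) (k - 1)

def delete_products_alt (ids : List Int) (m : Int) : Int :=
  let counts := PySem.List.sorted (PySem.Dict.counter ids).values (fun x => x) false
  greedyB counts m (counts.length : Int)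

-- ===== PRECONDITION & SPEC =====
-- Pre_ excludes exactly the inputs on which A raises IndexError (m large enough to delete every group)
def Pre_delete_products (ids : List Int) (m : Int) : Prop :=
  ids = [] ∨ m < (ids.length : Int)
instance (ids : List Int) (m : Int) : Decidable (Pre_delete_products ids m) := by
  unfold Pre_delete_products; infer_instance

def pvWitness_delete_products : List Int × Int := ([2, 1, 2], 1)

def Spec_delete_products (ids : List Int) (m : Int) (out : Int) : Prop := out = delete_products_alt ids m
instance (ids : List Int) (m : Int) (out : Int) : Decidable (Spec_delete_products ids m out) := by unfold Spec_delete_products; infer_instance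

-- ===== CLAIM (what is proved, stated in full; the proofs are below) =====
def Claim_equal_delete_products : Prop := ∀ (ids : List Int) (m : Int), Dom_delete_products ids m → Pre_delete_products ids m → Spec_delete_products ids m (delete_products ids m)
-- ===== LEMMAS AND PROOFS =====

-- unrolling A's loop at the last element of the list
lemma popLoopA_concat (ys : List (Int × Int)) (y : Int × Int) (m : Int) :
    popLoopA (ys ++ [y]) m
      = if y.2 ≤ m then popLoopA ys (m - y.2) else ((ys ++ [y]).length : Int) := by
  rw [popLoopA]
  split
  · next heq => simp at heq
  · next kc heq =>
    have hy : kc = y := by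
      have := heq
      rw [List.getLast?_concat] at this
      exact (Option.some_inj.mp this).symm
    subst hy
    rw [List.dropLast_concat]

-- A's pop-from-the-back loop over a list of (id, count) pairs is B's forward greedy
-- scan over the reversed count list.
lemma popLoopA_eq_greedyB (tup : List (Int × Int)) (m : Int) :
    popLoopA tup m = greedyB ((tup.map Prod.snd).reverse) m (tup.length : Int) := by
  induction tup using List.reverseRecOn generalizing m with
  | nil => simp [popLoopA, greedyB]
  | append_singleton ys y ih =>
    rw [popLoopA_concat]
    simp only [List.map_append, List.reverse_append, List.map_cons, List.map_nil,
      List.reverse_cons, List.reverse_nil, List.nil_append, List.cons_append,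
      List.length_append, List.length_cons, List.length_nil, greedyB]
    by_cases h : m < y.2
    · simp [h, not_le.mpr h]
    · simp [not_lt.mp h, h, ih]

-- the multiset of group sizes is invariant under permuting ids
lemma values_counter_perm (xs ys : List Int) (hp : xs.Perm ys) :
    (PySem.Dict.counter xs).values.Perm (PySem.Dict.counter ys).values := by
  have hv : ∀ zs : List Int, (PySem.Dict.counter zs).values
      = (PySem.Set.ofList zs).map (fun k => ((zs.count k : Int))) := by
    intro zs
    simp only [PySem.Dict.values, PySem.Dict.items_counter, List.map_map]
    rfl
  rw [hv, hv]
  have hsets : (PySem.Set.ofList xs).Perm (PySem.Set.ofList ys) := by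
    rw [List.perm_ext_iff_of_nodup (PySem.Set.nodup_ofList xs) (PySem.Set.nodup_ofList ys)]
    intro a
    simp [PySem.Set.mem_ofList, hp.mem_iff]
  have hfun : (fun k : Int => ((xs.count k : Int))) = fun k : Int => ((ys.count k : Int)) := by
    funext k
    exact_mod_cast hp.count_eq k
  rw [hfun]
  exact hsets.map _

-- the reversed count column of most_common is THE ascending sorted count list
lemma sorted_desc_reverse (items : List (Int × Int)) :
    ((PySem.List.sorted items (fun kv => kv.2) true).map Prod.snd).reverse
      = PySem.List.sorted (items.map Prod.snd) (fun x => x) false := by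
  symm
  apply PySem.List.sorted_id_eq_of_perm_of_pairwise
  · exact (List.reverse_perm _).trans
      ((PySem.List.sorted_perm items (fun kv => kv.2) true).map Prod.snd)
  · rw [List.pairwise_reverse, List.pairwise_map]
    exact PySem.List.sorted_pairwise_rev items (fun kv => kv.2)

-- ===== VERDICT (by name: the statement is the Claim_ definition above) =====
theorem delete_products_spec : Claim_equal_delete_products := by
  intro ids m _ _
  unfold Spec_delete_products delete_products delete_products_alt
  by_cases hnil : ids.length = 0
  · rw [List.length_eq_zero_iff] at hnil
    subst hnil
    rfl
  · simp only [hnil, if_false]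
    rw [popLoopA_eq_greedyB, sorted_desc_reverse]
    have hperm : (PySem.Dict.counter (PySem.List.sorted ids (fun x => x) false)).values.Perm
        (PySem.Dict.counter ids).values :=
      values_counter_perm _ _ (PySem.List.sorted_perm ids (fun x => x) false)
    have hvals : (PySem.Dict.counter (PySem.List.sorted ids (fun x => x) false)).items.map Prod.snd
        = (PySem.Dict.counter (PySem.List.sorted ids (fun x => x) false)).values := rfl
    rw [hvals]
    rw [PySem.List.sorted_eq_sorted_of_perm
      (PySem.Dict.counter (PySem.List.sorted ids (fun x => x) false)).values
      (PySem.Dict.counter ids).values (fun x : Int => x) (fun a b hab => hab) hperm]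
    congr 1
    have h1 : (PySem.List.sorted (PySem.Dict.counter (PySem.List.sorted ids (fun x => x) false)).items
        (fun kv => kv.2) true).length
        = (PySem.Dict.counter (PySem.List.sorted ids (fun x => x) false)).values.length := by
      rw [PySem.List.length_sorted]
      simp [PySem.Dict.values]
    rw [h1, hperm.length_eq,
      (PySem.List.length_sorted (PySem.Dict.counter ids).values (fun x : Int => x) false).symm]
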